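-- pv_equiv track=rewrite | github.com/danielcurelici/TeFacProgramator_rezolvari_python | Course_6/exercitii.py | word_appearances_long
-- ===== SOURCE A (Python) =====
-- def word_appearances_long(words):
--     """
--     This function creates a dictionary whose keys are the elements from a list
--     and the values are the number of appereances of these elements in the list.
--     This is the long version, where we iterate over the elements and if we
--     find the element as a key in the dictionary, then we increment the value
--     associated to the key, otherwise, we insert the element in the dictionary
--     as a new key, with the value 1 associated.
--     Parameters:
--         -words  :   list    => a list containing strings
--     Returns:
--         -a dictionary containing the words count
--     """
--     app_dict = {}
--     for word in words:
--         if word: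
--             if word in app_dict.keys():
--                 app_dict[word] += 1
--             else:
--                 app_dict[word] = 1
--     return app_dict
-- ===== SOURCE B (Python) =====
-- def word_appearances_long(words):
--     keys = dict.fromkeys(w for w in words if w)
--     return {k: words.count(k) for k in keys}
-- ===== Notes on version B (the rewrite author's own statement) =====
-- stated objective: simpler
-- what changed: Replaces the single accumulating membership-test-and-increment loop with a two-phase build: distinct non-empty words in first-appearance order via dict.fromkeys, then one words.count scan per distinct word.
import Mathlib
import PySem

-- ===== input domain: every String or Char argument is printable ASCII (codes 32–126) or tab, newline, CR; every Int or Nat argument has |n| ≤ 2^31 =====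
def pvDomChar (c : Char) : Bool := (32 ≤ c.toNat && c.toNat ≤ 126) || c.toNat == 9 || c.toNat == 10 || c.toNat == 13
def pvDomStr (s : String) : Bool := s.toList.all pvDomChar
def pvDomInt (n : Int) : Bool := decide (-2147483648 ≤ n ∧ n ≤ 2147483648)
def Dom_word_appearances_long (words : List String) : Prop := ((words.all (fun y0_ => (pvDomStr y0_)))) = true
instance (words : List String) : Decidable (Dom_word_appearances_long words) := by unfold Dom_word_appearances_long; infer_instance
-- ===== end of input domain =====

-- B replaces A's single accumulating loop by a distinct-keys pass followed by one count per key; objective: simpler.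

-- ===== PORT A =====
-- one accumulating dict: for each truthy word, increment if present else insert 1
def word_appearances_long (words : List String) : List (String × Int) :=
  (words.foldl
    (fun d word =>
      if word ≠ "" then
        if d.contains word then d.insert word (d.getD word 0 + 1)
        else d.insert word 1
      else d)
    PySem.Dict.empty).items

-- ===== PORT B =====
-- distinct non-empty words in first-appearance order (dict.fromkeys), then words.count per key
def word_appearances_long_alt (words : List String) : List (String × Int) :=
  (PySem.List.dedup (words.filter (fun w => w ≠ ""))).map
    (fun k => (k, (words.count k : Int)))

-- ===== PRECONDITION & SPEC =====
def Spec_word_appearances_long (words : List String) (out : List (String × Int)) : Prop := out = word_appearances_long_alt words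
instance (words : List String) (out : List (String × Int)) : Decidable (Spec_word_appearances_long words out) := by unfold Spec_word_appearances_long; infer_instance

-- ===== CLAIM (what is proved, stated in full; the proofs are below) =====
def Claim_equal_word_appearances_long : Prop := ∀ (words : List String), Dom_word_appearances_long words → Spec_word_appearances_long words (word_appearances_long words)

-- ===== LEMMAS AND PROOFS =====

-- A's branching step is the standard counting step (when absent, getD = 0).
theorem pv_step_eq (d : PySem.Dict String Int) (w : String) :
    (if d.contains w then d.insert w (d.getD w 0 + 1) else d.insert w 1)
      = d.insert w (d.getD w 0 + 1) := by
  by_cases h : d.contains w = true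
  · simp [h]
  · have h' : d.contains w = false := by simpa using h
    rw [if_neg h, PySem.Dict.getD_of_not_contains (h := h')]
    norm_num

theorem pv_foldA_eq (words : List String) :
    words.foldl
      (fun d word =>
        if word ≠ "" then
          if d.contains word then d.insert word (d.getD word 0 + 1)
          else d.insert word 1
        else d)
      PySem.Dict.empty
      = PySem.Dict.counter (words.filter (fun w => w ≠ "")) := by
  rw [← PySem.Dict.foldl_insert_getD_add_one_eq_counter, List.foldl_filter]
  apply PySem.List.foldl_congr_mem   -- pointwise equal step functions
  intro d w _
  by_cases hw : w = ""
  · simp [hw]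
  · simp only [hw, ne_eq, not_false_iff, if_pos, decide_true]
    simpa [hw] using pv_step_eq d w

-- ===== VERDICT (by name: the statement is the Claim_ definition above) =====
theorem word_appearances_long_spec : Claim_equal_word_appearances_long := by
  intro words _
  unfold Spec_word_appearances_long word_appearances_long word_appearances_long_alt
  rw [pv_foldA_eq, PySem.Dict.items_counter]
  simp only [PySem.List.dedup_eq_ofList]
  apply List.map_congr_left
  intro k hk
  have hk' : k ≠ "" := by
    have : k ∈ words.filter (fun w => w ≠ "") := by
      simpa using (PySem.Set.mem_ofList _ _).mp hk
    simpa using (List.mem_filter.mp this).2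
  simp [List.count_filter, hk']
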